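-- pv_equiv track=rewrite | github.com/kapil23vt/Practice | frequencysort.py | fsort
-- ===== SOURCE A (Python) =====
-- def fsort(s1):
--     l2 = []
--     d = dict()
--     result = ""
--
--     for i in range(len(s1)):
--         d[s1[i]] = 0
--
--     for i in range(len(s1)):
--         d[s1[i]] += 1
--
--     for i in (d):
--         result = result + i
--         result = result + str(d[i])
--
--
--     # print (d)
--     # print (result)
--     return result
-- ===== SOURCE B (Python) =====
-- def fsort(s1):
--     parts = []
--     for i in range(len(s1)):
--         c = s1[i]
--         if c not in s1[:i]:
--             parts.append(c + str(s1.count(c)))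
--     return "".join(parts)
-- ===== Notes on version B (the rewrite author's own statement) =====
-- stated objective: alternative
-- what changed: Replaces A's dictionary frequency table (two build passes plus a key-iteration pass) with a single dictionary-free index loop that emits a char the first time it appears (c not in s1[:i]) together with s1.count(c); trades the maintained table for repeated rescans.
import Mathlib
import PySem

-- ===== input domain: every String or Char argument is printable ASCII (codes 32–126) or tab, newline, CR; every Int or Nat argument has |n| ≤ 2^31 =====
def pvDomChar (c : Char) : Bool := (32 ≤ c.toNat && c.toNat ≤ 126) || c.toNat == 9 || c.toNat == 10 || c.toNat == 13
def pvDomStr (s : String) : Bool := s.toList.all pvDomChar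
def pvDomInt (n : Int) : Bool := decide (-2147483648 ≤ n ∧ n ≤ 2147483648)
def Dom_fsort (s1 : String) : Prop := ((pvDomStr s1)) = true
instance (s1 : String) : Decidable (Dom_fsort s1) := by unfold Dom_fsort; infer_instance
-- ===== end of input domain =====

-- B replaces A's dictionary frequency table with a dictionary-free index loop
-- (first-occurrence test + s1.count); alternative decomposition, not faster.

-- ===== PORT A =====
-- The loop indices i always satisfy 0 ≤ i < len(s1), so pyGetD's default 'A' is never read
-- (exact: Python's s1[i] never raises here).  result is accumulated as List Char and packed
-- with String.ofList at the end (Python concatenates str; the same character sequence).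
def fsort (s1 : String) : String :=
  let cs := s1.toList
  let d1 : PySem.Dict Char Int :=
    (PySem.List.pyRange 0 (PySem.Str.len s1)).foldl
      (fun d i => d.insert (PySem.List.pyGetD cs i 'A') 0) PySem.Dict.empty
  let d2 : PySem.Dict Char Int :=
    (PySem.List.pyRange 0 (PySem.Str.len s1)).foldl
      (fun d i => d.modify (PySem.List.pyGetD cs i 'A') 0 (· + 1)) d1
  String.ofList (d2.keys.foldl (fun r k => (r ++ [k]) ++ PySem.Int.toChars (d2.getD k 0)) [])

-- ===== PORT B =====
-- Same index-in-range remark for pyGetD's default.  parts are joined with "" at the end.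
def fsort_alt (s1 : String) : String :=
  let cs := s1.toList
  let parts : List (List Char) :=
    (PySem.List.pyRange 0 (PySem.Str.len s1)).foldl
      (fun acc i =>
        let c := PySem.List.pyGetD cs i 'A'
        if PySem.Chars.isIn [c] (PySem.List.slice cs none (some i)) = false then
          acc ++ [[c] ++ PySem.Int.toChars ((PySem.Chars.count cs [c] : Int))]
        else acc)
      []
  String.ofList (PySem.Chars.join [] parts)

-- ===== PRECONDITION & SPEC =====
def Spec_fsort (s1 : String) (out : String) : Prop := out = fsort_alt s1
instance (s1 : String) (out : String) : Decidable (Spec_fsort s1 out) := by unfold Spec_fsort; infer_instance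

-- ===== CLAIM (what is proved, stated in full; the proofs are below) =====
def Claim_equal_fsort : Prop := ∀ (s1 : String), Dom_fsort s1 → Spec_fsort s1 (fsort s1)

-- ===== LEMMAS AND PROOFS =====

-- s.count(c) for a single-character needle counts the occurrences of that character
lemma count_go_single (c : Char) : ∀ (fuel : Nat) (l : List Char) (acc : Nat),
    l.length ≤ fuel → PySem.Chars.count.go [c] fuel l acc = acc + l.count c
  | 0, l, acc, h => by
      have : l = [] := List.eq_nil_of_length_eq_zero (by omega)
      subst this; simp [PySem.Chars.count.go]
  | fuel+1, [], acc, h => by simp [PySem.Chars.count.go]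
  | fuel+1, x :: t, acc, h => by
      have ht : t.length ≤ fuel := by simp at h; omega
      by_cases hc : c = x
      · subst hc
        rw [show PySem.Chars.count.go [c] (fuel+1) (c::t) acc
              = PySem.Chars.count.go [c] fuel t (acc+1) from by
            simp [PySem.Chars.count.go, List.isPrefixOf]]
        rw [count_go_single c fuel t (acc+1) ht]
        simp; omega
      · rw [show PySem.Chars.count.go [c] (fuel+1) (x::t) acc
              = PySem.Chars.count.go [c] fuel t acc from by
            simp [PySem.Chars.count.go, List.isPrefixOf, hc]]
        rw [count_go_single c fuel t acc ht]
        simp [Ne.symm hc]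

lemma count_single (cs : List Char) (c : Char) : PySem.Chars.count cs [c] = cs.count c := by
  simp [PySem.Chars.count, count_go_single c cs.length cs 0 le_rfl]

-- 'c in l' for a single-character needle is list membership
lemma isIn_single (c : Char) (l : List Char) : PySem.Chars.isIn [c] l = l.contains c := by
  rcases h : l.contains c with _ | _
  · simp only [Bool.eq_false_iff] at h ⊢
    intro hx
    exact h (List.elem_eq_true_of_mem ((List.singleton_infix_iff c l).mp
      ((PySem.Chars.isIn_iff_infix _ _).mp hx)))
  · exact (PySem.Chars.isIn_iff_infix _ _).mpr ((List.singleton_infix_iff c l).mpr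
      (by simpa using h))

-- join with the empty separator is flatten
lemma join_nil_flatten (l : List (List Char)) : PySem.Chars.join [] l = l.flatten := by
  induction l with
  | nil => rfl
  | cons a t ih =>
      cases t with
      | nil => simp [PySem.Chars.join, List.intercalate]
      | cons b r =>
          rw [PySem.Chars.join_cons_cons] at *
          simp [ih]

-- after the insert-0 loop every value is 0
lemma getD_insert_zero (k : Char) : ∀ (l : List Char) (d : PySem.Dict Char Int),
    d.getD k 0 = 0 → (l.foldl (fun d c => d.insert c 0) d).getD k 0 = 0
  | [], _, h => h
  | x :: t, d, h => by
      refine getD_insert_zero k t _ ?_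
      rw [PySem.Dict.getD_insert]
      split <;> simp [h]

-- updating a set with elements it already has changes nothing
lemma update_self : ∀ (l : List Char) (s : PySem.Set Char),
    (∀ x ∈ l, s.contains x = true) → PySem.Set.update s l = s
  | [], _, _ => rfl
  | x :: t, s, h => by
      have hm : x ∈ s := by
        have := h x (by simp); simpa [PySem.Set.contains] using this
      have hx : PySem.Set.add s x = s := by
        simp [PySem.Set.add, PySem.Set.contains, hm]
      have hu : PySem.Set.update s (x :: t) = PySem.Set.update (PySem.Set.add s x) t := rfl
      rw [hu, hx, update_self t s (fun y hy => h y (by simp [hy]))]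

lemma contains_ofList (cs : List Char) (c : Char) :
    (PySem.Set.ofList cs : List Char).contains c = cs.contains c := by
  simp [List.contains_eq_mem, PySem.Set.mem_ofList]

-- the first-occurrence indices of cs enumerate exactly Set.ofList cs, in order
lemma firsts (d : Char) (cs : List Char) :
    ((List.range cs.length).filter (fun i => !(cs.take i).contains (cs.getD i d))).map
      (fun i => cs.getD i d) = PySem.Set.ofList cs := by
  induction cs using List.reverseRecOn with
  | nil => rfl
  | append_singleton cs c ih =>
      have hgetD : ∀ i : Nat, i < cs.length → (cs ++ [c]).getD i d = cs.getD i d := by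
        intro i hi
        simp [List.getD, List.getElem?_append_left hi]
      have hlast : (cs ++ [c]).getD cs.length d = c := by
        simp [List.getD]
      have htakelast : (cs ++ [c]).take cs.length = cs := by
        simpa using List.take_left (l₁ := cs) (l₂ := [c])
      have hfilter :
          (List.range cs.length).filter
              (fun i => !((cs ++ [c]).take i).contains ((cs ++ [c]).getD i d))
            = (List.range cs.length).filter (fun i => !(cs.take i).contains (cs.getD i d)) := by
        apply List.filter_congr
        intro i hi
        have hi' : i < cs.length := List.mem_range.mp hi
        rw [hgetD i hi', List.take_append_of_le_length hi'.le]
      have hmap : ∀ l : List Nat, (∀ i ∈ l, i < cs.length) →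
          l.map (fun i => (cs ++ [c]).getD i d) = l.map (fun i => cs.getD i d) := by
        intro l hl
        exact List.map_congr_left (fun i hi => hgetD i (hl i hi))
      have hofList : (PySem.Set.ofList (cs ++ [c]) : List Char)
          = if cs.contains c then PySem.Set.ofList cs else PySem.Set.ofList cs ++ [c] := by
        show (cs ++ [c]).foldl PySem.Set.add PySem.Set.empty = _
        rw [List.foldl_append]
        show PySem.Set.add (PySem.Set.ofList cs) c = _
        rw [PySem.Set.add, contains_ofList]
      have hcond : ((cs ++ [c]).take cs.length).contains ((cs ++ [c]).getD cs.length d)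
          = cs.contains c := by
        rw [htakelast, hlast]
      have hsing : List.filter
            (fun i => !((cs ++ [c]).take i).contains ((cs ++ [c]).getD i d)) [cs.length]
          = if cs.contains c then [] else [cs.length] := by
        rw [List.filter_singleton]
        simp only [hcond]
        rcases cs.contains c <;> simp
      rw [List.length_append, List.length_singleton, List.range_succ, List.filter_append,
        List.map_append, hfilter, hmap _ (fun i hi => List.mem_range.mp (List.mem_filter.mp hi).1),
        ih, hofList, hsing]
      rcases h : cs.contains c with _ | _
      · simp [h, hlast]
      · simp [h]

-- ===== VERDICT (by name: the statement is the Claim_ definition above) =====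
theorem fsort_spec : Claim_equal_fsort := by
  intro s1 _
  show fsort s1 = fsort_alt s1
  unfold fsort fsort_alt
  dsimp only
  set cs := s1.toList with hcs
  set g : Char → List Char := fun c => [c] ++ PySem.Int.toChars ((cs.count c : Int)) with hg
  -- the index range maps onto cs
  have hmapkey : (PySem.List.pyRange 0 (PySem.Str.len s1)).map
      (fun i => PySem.List.pyGetD cs i 'A') = cs := by
    rw [PySem.Str.len_eq]
    simpa [PySem.List.len] using PySem.List.map_pyGetD_pyRange_zero cs 'A'
  have hfoldl_map : ∀ {β : Type} (f : β → Char → β) (init : β),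
      (PySem.List.pyRange 0 (PySem.Str.len s1)).foldl
        (fun a i => f a (PySem.List.pyGetD cs i 'A')) init = cs.foldl f init := by
    intro β f init
    conv_rhs => rw [← hmapkey]
    rw [List.foldl_map]
  -- ===== A's side: the dict holds exactly the counts, keyed in first-occurrence order =====
  have hd1 : (PySem.List.pyRange 0 (PySem.Str.len s1)).foldl
      (fun d i => d.insert (PySem.List.pyGetD cs i 'A') 0) (PySem.Dict.empty : PySem.Dict Char Int)
      = cs.foldl (fun d c => d.insert c 0) PySem.Dict.empty :=
    hfoldl_map (fun (d : PySem.Dict Char Int) c => d.insert c 0) _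
  set d1 : PySem.Dict Char Int := cs.foldl (fun d c => d.insert c 0) PySem.Dict.empty with hd1'
  have hd2 : (PySem.List.pyRange 0 (PySem.Str.len s1)).foldl
      (fun d i => d.modify (PySem.List.pyGetD cs i 'A') 0 (· + 1)) d1
      = cs.foldl (fun d c => d.modify c 0 (· + 1)) d1 :=
    hfoldl_map (fun (d : PySem.Dict Char Int) c => d.modify c 0 (· + 1)) _
  set d2 : PySem.Dict Char Int := cs.foldl (fun d c => d.modify c 0 (· + 1)) d1 with hd2'
  have hkeys1 : d1.keys = PySem.Set.ofList cs := by
    rw [hd1', PySem.Dict.keys_foldl_insert cs (fun _ _ => (0 : Int))]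
    rfl
  have hkeys : d2.keys = PySem.Set.ofList cs := by
    rw [hd2', PySem.Dict.keys_foldl_modify cs 0 (fun _ _ => (· + 1)), hkeys1]
    exact update_self cs _ (fun x hx =>
      (contains_ofList cs x).trans (List.elem_eq_true_of_mem hx))
  have hgetD : ∀ k : Char, d2.getD k 0 = (cs.count k : Int) := by
    intro k
    rw [hd2', PySem.Dict.getD_foldl_modify_add_one,
      getD_insert_zero k cs PySem.Dict.empty (PySem.Dict.getD_empty k 0)]
    simp
  have hA : (d2.keys.foldl (fun r k => (r ++ [k]) ++ PySem.Int.toChars (d2.getD k 0)) [])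
      = (PySem.Set.ofList cs : List Char).flatMap g := by
    have hfun : (fun (r : List Char) k => (r ++ [k]) ++ PySem.Int.toChars (d2.getD k 0))
        = fun r k => r ++ g k := by
      funext r k
      rw [hgetD k, List.append_assoc, hg]
    rw [hfun, hkeys, PySem.List.foldl_append_eq_flatMap]
    simp
  rw [hd1, hd2, hA]
  -- ===== B's side: the filtered index loop emits the same blocks =====
  rw [PySem.Str.len_eq, PySem.List.pyRange_zero_natCast, List.foldl_map]
  have hbody : (fun (acc : List (List Char)) (i : Nat) =>
        (fun acc (i : Int) =>
          let c := PySem.List.pyGetD cs i 'A'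
          if PySem.Chars.isIn [c] (PySem.List.slice cs none (some i)) = false then
            acc ++ [[c] ++ PySem.Int.toChars ((PySem.Chars.count cs [c] : Int))]
          else acc) acc ((i : Nat) : Int))
      = fun acc i =>
          if (!(cs.take i).contains (cs.getD i 'A')) = true then
            acc ++ [g (cs.getD i 'A')] else acc := by
    funext acc i
    simp only [PySem.List.pyGetD_natCast,
      PySem.List.slice_to cs (by positivity : (0 : Int) ≤ (i : Int)), Int.toNat_natCast,
      isIn_single, count_single, hg, Bool.not_eq_eq_eq_not, Bool.not_true]
  rw [hbody, PySem.List.foldl_append_if, join_nil_flatten]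
  simp only [List.nil_append]
  rw [show (fun i => g (cs.getD i 'A'))
      = g ∘ (fun i => cs.getD i 'A') from rfl, ← List.map_map, firsts 'A' cs]
  simp [List.flatMap_def]
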